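-- pv_equiv track=rewrite | github.com/deep6821/rohit-workspace | programs/must-do-ques/array/Subarrays_with_distinct_elements.py | sum_of_length
-- ===== SOURCE A (Python) =====
-- def sum_of_length(arr, n):
--     # For maintaining distinct elements.
--     s = []
--
--     # Initialize ending point and result
--     j = 0
--     ans = 0
--
--     # Fix starting point
--     for i in range(n):
--         # Find ending point for current subarray with distinct elements.
--         while j < n and (arr[j] not in s):
--             s.append(arr[j])
--             j += 1
--
--         # Calculating and adding all possible length subarrays in arr[i..j]
--         ans += ((j - i) * (j - i + 1)) // 2
--
--         # Remove arr[i] as we pick new stating point from next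
--         s.remove(arr[i])
--
--     return ans
-- ===== SOURCE B (Python) =====
-- def sum_of_length(arr, n):
--     # One backward pass: f = right end (exclusive) of the maximal distinct window
--     # starting at i, via f(i) = min(f(i+1), next occurrence of arr[i]); the window
--     # starting at i contributes (f-i)*(f-i+1)//2.
--     nxt = {}
--     f = n
--     ans = 0
--     for i in range(n - 1, -1, -1):
--         x = arr[i]
--         f = min(f, nxt.get(x, n))
--         nxt[x] = i
--         w = f - i
--         ans += w * (w + 1) // 2
--     return ans
-- ===== Notes on version B (the rewrite author's own statement) =====
-- stated objective: faster
-- what changed: Replaced the forward start-fixed scan with its inner membership/remove list scans by a single backward pass that computes each maximal window end from a next-occurrence dictionary via f(i)=min(f(i+1), next[arr[i]]), removing the while loop and the list scans entirely.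
import Mathlib
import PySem

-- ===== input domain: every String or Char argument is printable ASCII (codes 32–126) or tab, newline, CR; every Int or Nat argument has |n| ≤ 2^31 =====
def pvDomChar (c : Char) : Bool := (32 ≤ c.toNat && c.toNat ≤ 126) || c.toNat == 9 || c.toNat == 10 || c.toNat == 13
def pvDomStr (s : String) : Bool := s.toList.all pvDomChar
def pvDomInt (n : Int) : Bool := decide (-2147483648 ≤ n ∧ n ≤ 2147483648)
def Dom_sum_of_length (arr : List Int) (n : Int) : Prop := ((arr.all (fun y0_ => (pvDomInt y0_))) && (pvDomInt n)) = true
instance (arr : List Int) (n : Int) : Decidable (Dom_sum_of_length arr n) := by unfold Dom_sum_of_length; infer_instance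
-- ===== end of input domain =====

-- B replaces A's forward scan with per-start membership/remove list scans by one
-- backward pass computing each maximal window end from a next-occurrence dict (faster).

-- ===== PORT A =====
-- inner 'while j < n and (arr[j] not in s): s.append(arr[j]); j += 1'
def pvAWhile (arr : List Int) (n : Int) (s : List Int) (j : Int) : List Int × Int :=
  if j < n ∧ PySem.List.pyGetD arr j 0 ∉ s then
    pvAWhile arr n (s ++ [PySem.List.pyGetD arr j 0]) (j + 1)
  else (s, j)
termination_by (n - j).toNat
decreasing_by omega

-- one iteration of A's 'for i in range(n)' body; s.remove(arr[i]) never fails under Pre_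
def pvStepA (arr : List Int) (n : Int) (st : List Int × Int × Int) (i : Int) :
    List Int × Int × Int :=
  let r := pvAWhile arr n st.1 st.2.1
  let ans := st.2.2 + PySem.Int.floordiv ((r.2 - i) * (r.2 - i + 1)) 2
  ((PySem.List.remove? r.1 (PySem.List.pyGetD arr i 0)).getD r.1, r.2, ans)

def sum_of_length (arr : List Int) (n : Int) : Int :=
  ((PySem.List.pyRange 0 n 1).foldl (pvStepA arr n) ([], 0, 0)).2.2

-- ===== PORT B =====
-- one iteration of B's 'for i in range(n-1, -1, -1)' body
def pvStepB (arr : List Int) (n : Int) (st : PySem.Dict Int Int × Int × Int) (i : Int) :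
    PySem.Dict Int Int × Int × Int :=
  let x := PySem.List.pyGetD arr i 0
  let f := min st.2.1 (st.1.getD x n)
  let w := f - i
  (st.1.insert x i, f, st.2.2 + PySem.Int.floordiv (w * (w + 1)) 2)

def sum_of_length_alt (arr : List Int) (n : Int) : Int :=
  ((PySem.List.pyRange (n - 1) (-1) (-1)).foldl (pvStepB arr n) (PySem.Dict.empty, n, 0)).2.2

-- ===== PRECONDITION & SPEC =====
-- Python A raises IndexError (arr[j]) as soon as n exceeds len(arr); those inputs are excluded.
def Pre_sum_of_length (arr : List Int) (n : Int) : Prop := n ≤ arr.length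
instance (arr : List Int) (n : Int) : Decidable (Pre_sum_of_length arr n) := by
  unfold Pre_sum_of_length; infer_instance

def pvWitness_sum_of_length : List Int × Int := ([1, 2, 1], 3)

def Spec_sum_of_length (arr : List Int) (n : Int) (out : Int) : Prop := out = sum_of_length_alt arr n
instance (arr : List Int) (n : Int) (out : Int) : Decidable (Spec_sum_of_length arr n out) := by
  unfold Spec_sum_of_length; infer_instance

-- ===== CLAIM (what is proved, stated in full; the proofs are below) =====
def Claim_equal_sum_of_length : Prop := ∀ (arr : List Int) (n : Int), Dom_sum_of_length arr n → Pre_sum_of_length arr n → Spec_sum_of_length arr n (sum_of_length arr n)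

-- ===== LEMMAS AND PROOFS =====

-- arr[i..j) as a list of values (getD-view; indices only, no bound needed)
def pvSl (a : List Int) (i j : Nat) : List Int :=
  (List.range' i (j - i)).map (fun e => a.getD e 0)

-- first index e' ≥ e below N with a[e'] = x, else N
def pvNd (a : List Int) (x : Int) (N e : Nat) : Nat :=
  if e < N then (if a.getD e 0 = x then e else pvNd a x N (e + 1)) else N
termination_by N - e

-- exclusive right end of the maximal distinct window starting at i (within [0,N))
def pvF (a : List Int) (N i : Nat) : Nat :=
  if i < N then min (pvNd a (a.getD i 0) N (i + 1)) (pvF a N (i + 1)) else N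
termination_by N - i

def pvT (k : Int) : Int := PySem.Int.floordiv (k * (k + 1)) 2

def pvSum (a : List Int) (N i : Nat) : Int :=
  if i < N then pvT ((pvF a N i : Int) - (i : Int)) + pvSum a N (i + 1) else 0
termination_by N - i

def pvSumRev (a : List Int) (N : Nat) : Nat → Int
  | 0 => 0
  | i + 1 => pvT ((pvF a N i : Int) - (i : Int)) + pvSumRev a N i

theorem pvAWhile_eqn (arr : List Int) (n : Int) (s : List Int) (j : Int) :
    pvAWhile arr n s j =
      if j < n ∧ PySem.List.pyGetD arr j 0 ∉ s then
        pvAWhile arr n (s ++ [PySem.List.pyGetD arr j 0]) (j + 1)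
      else (s, j) := by
  conv_lhs => rw [pvAWhile]

theorem pvNd_pos (a : List Int) (x : Int) (N : Nat) {e : Nat} (h : e < N) :
    pvNd a x N e = if a.getD e 0 = x then e else pvNd a x N (e + 1) := by
  conv_lhs => rw [pvNd]
  rw [if_pos h]

theorem pvNd_neg (a : List Int) (x : Int) (N : Nat) {e : Nat} (h : ¬ e < N) :
    pvNd a x N e = N := by
  conv_lhs => rw [pvNd]
  rw [if_neg h]

theorem pvF_pos (a : List Int) (N : Nat) {i : Nat} (h : i < N) :
    pvF a N i = min (pvNd a (a.getD i 0) N (i + 1)) (pvF a N (i + 1)) := by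
  conv_lhs => rw [pvF]
  rw [if_pos h]

theorem pvF_neg (a : List Int) (N : Nat) {i : Nat} (h : ¬ i < N) : pvF a N i = N := by
  conv_lhs => rw [pvF]
  rw [if_neg h]

theorem pvSum_pos (a : List Int) (N : Nat) {i : Nat} (h : i < N) :
    pvSum a N i = pvT ((pvF a N i : Int) - (i : Int)) + pvSum a N (i + 1) := by
  conv_lhs => rw [pvSum]
  rw [if_pos h]

theorem pvSum_neg (a : List Int) (N : Nat) {i : Nat} (h : ¬ i < N) : pvSum a N i = 0 := by
  conv_lhs => rw [pvSum]
  rw [if_neg h]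

theorem pvSl_nil (a : List Int) (i : Nat) : pvSl a i i = [] := by
  simp [pvSl]

theorem pvSl_cons (a : List Int) {i j : Nat} (h : i < j) :
    pvSl a i j = a.getD i 0 :: pvSl a (i + 1) j := by
  unfold pvSl
  rw [show j - i = (j - (i + 1)) + 1 by omega, List.range'_succ]
  rfl

theorem pvSl_concat (a : List Int) {i j : Nat} (h : i ≤ j) :
    pvSl a i (j + 1) = pvSl a i j ++ [a.getD j 0] := by
  unfold pvSl
  rw [show j + 1 - i = (j - i) + 1 by omega, List.range'_concat, List.map_append,
    show i + 1 * (j - i) = j by omega]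
  rfl

theorem pvSl_append (a : List Int) {i k j : Nat} (h1 : i ≤ k) (h2 : k ≤ j) :
    pvSl a i j = pvSl a i k ++ pvSl a k j := by
  unfold pvSl
  rw [← List.map_append]
  congr 1
  rw [show j - i = (k - i) + (j - k) by omega, ← List.range'_append,
    show i + 1 * (k - i) = k by omega]

theorem mem_pvSl (a : List Int) {i j : Nat} {x : Int} :
    x ∈ pvSl a i j ↔ ∃ e, i ≤ e ∧ e < j ∧ a.getD e 0 = x := by
  simp only [pvSl, List.mem_map, List.mem_range']
  constructor
  · rintro ⟨e, ⟨t, ht, rfl⟩, hx⟩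
    exact ⟨i + 1 * t, by omega, by omega, hx⟩
  · rintro ⟨e, h1, h2, hx⟩
    exact ⟨e, ⟨e - i, by omega, by omega⟩, hx⟩

theorem pvSl_nodup_prefix (a : List Int) {i k j : Nat} (h1 : i ≤ k) (h2 : k ≤ j)
    (h : (pvSl a i j).Nodup) : (pvSl a i k).Nodup := by
  rw [pvSl_append a h1 h2] at h
  exact h.of_append_left

theorem pvNd_ge (a : List Int) (x : Int) (N : Nat) : ∀ e, e ≤ N → e ≤ pvNd a x N e := by
  intro e
  induction e using pvNd.induct a x N with
  | case1 e h heq => intro _; rw [pvNd_pos a x N h, if_pos heq]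
  | case2 e h heq ih =>
      intro _
      rw [pvNd_pos a x N h, if_neg heq]
      have := ih (by omega)
      omega
  | case3 e h => intro he; rw [pvNd_neg a x N h]; omega

theorem pvNd_not_before (a : List Int) (x : Int) (N : Nat) :
    ∀ e e', e ≤ e' → e' < pvNd a x N e → a.getD e' 0 ≠ x := by
  intro e
  induction e using pvNd.induct a x N with
  | case1 e h heq =>
      intro e' h1 h2
      rw [pvNd_pos a x N h, if_pos heq] at h2; omega
  | case2 e h heq ih =>
      intro e' h1 h2
      rw [pvNd_pos a x N h, if_neg heq] at h2
      rcases Nat.eq_or_lt_of_le h1 with rfl | hlt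
      · exact heq
      · exact ih e' hlt h2
  | case3 e h =>
      intro e' h1 h2
      rw [pvNd_neg a x N h] at h2; omega

theorem pvNd_hit (a : List Int) (x : Int) (N : Nat) :
    ∀ e, pvNd a x N e < N → a.getD (pvNd a x N e) 0 = x := by
  intro e
  induction e using pvNd.induct a x N with
  | case1 e h heq => intro _; rw [pvNd_pos a x N h, if_pos heq]; exact heq
  | case2 e h heq ih =>
      intro hlt
      rw [pvNd_pos a x N h, if_neg heq] at hlt ⊢
      exact ih hlt
  | case3 e h =>
      intro hlt
      rw [pvNd_neg a x N h] at hlt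
      exact absurd hlt (lt_irrefl _)

theorem pvF_le (a : List Int) (N : Nat) : ∀ i, pvF a N i ≤ N := by
  intro i
  induction i using pvF.induct N with
  | case1 i h ih => rw [pvF_pos a N h]; omega
  | case2 i h => rw [pvF_neg a N h]

theorem pvF_ge (a : List Int) (N : Nat) : ∀ i, i ≤ N → i ≤ pvF a N i := by
  intro i
  induction i using pvF.induct N with
  | case1 i h ih =>
      intro _
      rw [pvF_pos a N h]
      have h1 := pvNd_ge a (a.getD i 0) N (i + 1) (by omega)
      have h2 := ih (by omega)
      omega
  | case2 i h => intro hle; rw [pvF_neg a N h]; omega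

theorem pvF_succ_le (a : List Int) (N : Nat) {i : Nat} (h : i < N) :
    i + 1 ≤ pvF a N i := by
  rw [pvF_pos a N h]
  have h1 := pvNd_ge a (a.getD i 0) N (i + 1) (by omega)
  have h2 := pvF_ge a N (i + 1) (by omega)
  omega

theorem pvF_mono (a : List Int) (N : Nat) {i : Nat} (h : i < N) :
    pvF a N i ≤ pvF a N (i + 1) := by
  rw [pvF_pos a N h]
  exact min_le_right _ _

theorem pvF_nodup (a : List Int) (N : Nat) : ∀ i, i ≤ N → (pvSl a i (pvF a N i)).Nodup := by
  intro i
  induction i using pvF.induct N with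
  | case1 i h ih =>
      intro _
      have hs := pvF_succ_le a N h
      rw [pvSl_cons a (by omega : i < pvF a N i)]
      have htail : (pvSl a (i + 1) (pvF a N i)).Nodup :=
        pvSl_nodup_prefix a hs (pvF_mono a N h) (ih (by omega))
      refine List.nodup_cons.2 ⟨?_, htail⟩
      intro hmem
      rcases (mem_pvSl a).1 hmem with ⟨e, he1, he2, hx⟩
      have hnd : pvF a N i ≤ pvNd a (a.getD i 0) N (i + 1) := by
        rw [pvF_pos a N h]; exact min_le_left _ _
      exact pvNd_not_before a (a.getD i 0) N (i + 1) e he1 (by omega) hx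
  | case2 i h =>
      intro hle
      have hiN : i = N := by omega
      rw [pvF_neg a N h, ← hiN, pvSl_nil]
      exact List.nodup_nil

theorem pvF_stop (a : List Int) (N : Nat) :
    ∀ i, i ≤ N → pvF a N i = N ∨ a.getD (pvF a N i) 0 ∈ pvSl a i (pvF a N i) := by
  intro i
  induction i using pvF.induct N with
  | case1 i h ih =>
      intro _
      by_cases hN : pvF a N i = N
      · exact Or.inl hN
      right
      have hle := pvF_le a N i
      have hs := pvF_succ_le a N h
      rcases le_total (pvNd a (a.getD i 0) N (i + 1)) (pvF a N (i + 1)) with hc | hc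
      · have hF : pvF a N i = pvNd a (a.getD i 0) N (i + 1) := by
          rw [pvF_pos a N h]; omega
        have hhit : a.getD (pvF a N i) 0 = a.getD i 0 := by
          rw [hF]; exact pvNd_hit a (a.getD i 0) N (i + 1) (by omega)
        rw [hhit]
        exact (mem_pvSl a).2 ⟨i, le_rfl, by omega, rfl⟩
      · have hF : pvF a N i = pvF a N (i + 1) := by
          rw [pvF_pos a N h]; omega
        rcases ih (by omega) with h1 | h1
        · omega
        · rw [hF]
          rcases (mem_pvSl a).1 h1 with ⟨e, he1, he2, hx⟩
          exact (mem_pvSl a).2 ⟨e, by omega, by omega, hx⟩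
  | case2 i h => intro _; exact Or.inl (pvF_neg a N h)

theorem pvAWhile_eq (a : List Int) (N : Nat) {i : Nat} (hi : i ≤ N) :
    ∀ j : Nat, i ≤ j → j ≤ pvF a N i →
    pvAWhile a (N : Int) (pvSl a i j) (j : Int) =
      (pvSl a i (pvF a N i), ((pvF a N i : Nat) : Int)) := by
  intro j
  induction hm : pvF a N i - j generalizing j with
  | zero =>
      intro h1 h2
      have hj : j = pvF a N i := by omega
      subst hj
      rw [pvAWhile_eqn, if_neg]
      rintro ⟨hlt, hnot⟩
      rcases pvF_stop a N i hi with hstop | hstop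
      · rw [hstop] at hlt; exact absurd hlt (lt_irrefl _)
      · rw [PySem.List.pyGetD_natCast] at hnot
        exact hnot hstop
  | succ m ih =>
      intro h1 h2
      have hjF : j < pvF a N i := by omega
      have hjN : j < N := by have := pvF_le a N i; omega
      have hnd : (pvSl a i (j + 1)).Nodup :=
        pvSl_nodup_prefix a (by omega) (by omega) (pvF_nodup a N i hi)
      have hnotin : a.getD j 0 ∉ pvSl a i j := by
        rw [pvSl_concat a h1] at hnd
        have hdisj := List.disjoint_of_nodup_append hnd
        intro hmem
        exact hdisj hmem (by simp)
      rw [pvAWhile_eqn, if_pos]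
      · have harg : pvSl a i j ++ [PySem.List.pyGetD a (j : Int) 0] = pvSl a i (j + 1) := by
          rw [pvSl_concat a h1, PySem.List.pyGetD_natCast]
        rw [harg, show ((j : Int) + 1) = ((j + 1 : Nat) : Int) by push_cast; ring]
        exact ih (j + 1) (by omega) (by omega) (by omega)
      · constructor
        · exact_mod_cast hjN
        · rw [PySem.List.pyGetD_natCast]
          exact hnotin

theorem outerA (a : List Int) (N : Nat) :
    ∀ i, i ≤ N → ∀ (j : Nat) (ans : Int), i ≤ j → j ≤ pvF a N i →
    ((PySem.List.pyRange (i : Int) (N : Int) 1).foldl (pvStepA a (N : Int))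
      (pvSl a i j, ((j : Nat) : Int), ans)).2.2 = ans + pvSum a N i := by
  intro i
  induction i using pvF.induct N with
  | case1 i h ih =>
      intro _ j ans h1 h2
      rw [PySem.List.pyRange_one_cons (by exact_mod_cast h)]
      rw [List.foldl_cons]
      have hwhile := pvAWhile_eq a N (by omega : i ≤ N) j h1 h2
      have hsucc := pvF_succ_le a N h
      have hstep : pvStepA a (N : Int) (pvSl a i j, ((j : Nat) : Int), ans) (i : Int) =
          (pvSl a (i + 1) (pvF a N i), ((pvF a N i : Nat) : Int),
           ans + pvT ((pvF a N i : Int) - (i : Int))) := by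
        simp only [pvStepA, hwhile]
        have hcons : pvSl a i (pvF a N i) = a.getD i 0 :: pvSl a (i + 1) (pvF a N i) :=
          pvSl_cons a (by omega)
        rw [hcons, PySem.List.pyGetD_natCast]
        simp [pvT]
      rw [hstep, show ((i : Int) + 1) = ((i + 1 : Nat) : Int) by push_cast; ring]
      rw [ih (by omega) (pvF a N i) (ans + pvT ((pvF a N i : Int) - (i : Int)))
        (by omega) (pvF_mono a N h)]
      rw [pvSum_pos a N h]
      ring
  | case2 i h =>
      intro hle j ans h1 h2
      rw [PySem.List.pyRange_one_eq_nil (by exact_mod_cast Nat.le_of_not_lt h)]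
      rw [pvSum_neg a N h]
      simp

theorem outerB (a : List Int) (N : Nat) :
    ∀ i, i ≤ N → ∀ (nxt : PySem.Dict Int Int) (ans : Int),
    (∀ x : Int, nxt.getD x (N : Int) = ((pvNd a x N i : Nat) : Int)) →
    ((PySem.List.pyRange ((i : Int) - 1) (-1) (-1)).foldl (pvStepB a (N : Int))
      (nxt, ((pvF a N i : Nat) : Int), ans)).2.2 = ans + pvSumRev a N i := by
  intro i
  induction i with
  | zero =>
      intro _ nxt ans _
      rw [PySem.List.pyRange_neg_one_eq_nil (by omega)]
      simp [pvSumRev]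
  | succ k ih =>
      intro hle nxt ans hinv
      have hkN : k < N := by omega
      rw [show ((k + 1 : Nat) : Int) - 1 = (k : Int) by push_cast; ring]
      rw [PySem.List.pyRange_neg_one_cons (by omega)]
      rw [List.foldl_cons]
      have hstep : pvStepB a (N : Int) (nxt, ((pvF a N (k + 1) : Nat) : Int), ans) (k : Int) =
          (nxt.insert (a.getD k 0) (k : Int), ((pvF a N k : Nat) : Int),
           ans + pvT ((pvF a N k : Int) - (k : Int))) := by
        simp only [pvStepB, PySem.List.pyGetD_natCast]
        rw [hinv (a.getD k 0)]
        have hmin : min ((pvF a N (k + 1) : Nat) : Int)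
            ((pvNd a (a.getD k 0) N (k + 1) : Nat) : Int) = ((pvF a N k : Nat) : Int) := by
          rw [← Nat.cast_min]
          congr 1
          rw [pvF_pos a N hkN]
          omega
        rw [hmin]
        simp [pvT]
      rw [hstep]
      have hinv' : ∀ x : Int, (nxt.insert (a.getD k 0) (k : Int)).getD x (N : Int) =
          ((pvNd a x N k : Nat) : Int) := by
        intro x
        rw [PySem.Dict.getD_insert]
        by_cases hx : x = a.getD k 0
        · subst hx
          rw [if_pos rfl, pvNd_pos a _ N hkN, if_pos rfl]
        · rw [if_neg hx, hinv x, pvNd_pos a x N hkN, if_neg (fun hc => hx hc.symm)]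
      rw [ih (by omega) (nxt.insert (a.getD k 0) (k : Int))
        (ans + pvT ((pvF a N k : Int) - (k : Int))) hinv']
      simp only [pvSumRev]
      ring

theorem sum_split (a : List Int) (N : Nat) :
    ∀ i, i ≤ N → pvSumRev a N i + pvSum a N i = pvSum a N 0 := by
  intro i
  induction i with
  | zero => intro _; simp [pvSumRev]
  | succ k ih =>
      intro hle
      have hkN : k < N := by omega
      have hS := pvSum_pos a N hkN
      have hI := ih (by omega)
      simp only [pvSumRev]
      omega

-- ===== VERDICT (by name: the statement is the Claim_ definition above) =====
theorem sum_of_length_spec : Claim_equal_sum_of_length := by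
  intro arr n _hdom _hpre
  unfold Spec_sum_of_length
  by_cases hn : n < 0
  · unfold sum_of_length sum_of_length_alt
    rw [PySem.List.pyRange_one_eq_nil (by omega), PySem.List.pyRange_neg_one_eq_nil (by omega)]
    simp
  · rw [Int.not_lt] at hn
    obtain ⟨N, rfl⟩ : ∃ N : Nat, n = (N : Int) := ⟨n.toNat, (Int.toNat_of_nonneg hn).symm⟩
    have hA : sum_of_length arr (N : Int) = pvSum arr N 0 := by
      unfold sum_of_length
      have h0 : ((PySem.List.pyRange ((0 : Nat) : Int) (N : Int) 1).foldl (pvStepA arr (N : Int))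
          (pvSl arr 0 0, ((0 : Nat) : Int), 0)).2.2 = 0 + pvSum arr N 0 :=
        outerA arr N 0 (by omega) 0 0 le_rfl (pvF_ge arr N 0 (by omega))
      rw [pvSl_nil] at h0
      simpa using h0
    have hB : sum_of_length_alt arr (N : Int) = pvSumRev arr N N := by
      unfold sum_of_length_alt
      have hinv : ∀ x : Int, (PySem.Dict.empty : PySem.Dict Int Int).getD x (N : Int) =
          ((pvNd arr x N N : Nat) : Int) := by
        intro x
        rw [PySem.Dict.getD_empty, pvNd_neg arr x N (lt_irrefl N)]
      have hFN : pvF arr N N = N := pvF_neg arr N (lt_irrefl N)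
      have h0 := outerB arr N N le_rfl PySem.Dict.empty 0 hinv
      rw [hFN] at h0
      simpa using h0
    rw [hA, hB]
    have h1 := sum_split arr N N le_rfl
    have h2 := pvSum_neg arr N (lt_irrefl N)
    omega
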